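-- pv_equiv track=rewrite | github.com/KITKATXU/SROIE | rules/rule4.py | IsFloatNum
-- ===== SOURCE A (Python) =====
-- def IsFloatNum(str):
--     s=str.split('.')
--     if len(s)>2:
--         return False
--     else:
--         for si in s:
--             if not si.isdigit():
--                 return False
--         return True
-- ===== SOURCE B (Python) =====
-- def IsFloatNum(str):
--     # single left-to-right scan: dot counter + 'expect a digit' flag
--     dots = 0
--     expect = True
--     for c in str:
--         if c == '.':
--             if expect:
--                 return False
--             dots += 1
--             expect = True
--         elif c.isdigit():
--             expect = False
--         else:
--             return False
--     return not expect and dots <= 1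
-- ===== Notes on version B (the rewrite author's own statement) =====
-- stated objective: alternative
-- what changed: B replaces A's split-on-dot-then-check-each-segment decomposition by a single character scan maintaining a dot counter and an expect-digit flag, never materialising the segment list.
import Mathlib
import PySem

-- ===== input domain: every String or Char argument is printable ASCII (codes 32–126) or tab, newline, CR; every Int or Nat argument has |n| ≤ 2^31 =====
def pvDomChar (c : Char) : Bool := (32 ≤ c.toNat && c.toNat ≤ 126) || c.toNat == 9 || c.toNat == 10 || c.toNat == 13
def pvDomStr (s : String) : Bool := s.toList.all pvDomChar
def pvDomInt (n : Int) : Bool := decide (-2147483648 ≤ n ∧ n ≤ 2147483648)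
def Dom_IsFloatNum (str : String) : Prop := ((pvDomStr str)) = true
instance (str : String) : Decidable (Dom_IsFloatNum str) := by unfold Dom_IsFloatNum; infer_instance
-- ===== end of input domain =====

-- B checks float-ness by one scan with a dot counter and an expect-digit flag instead of
-- A's split-on-'.' and per-segment isdigit; same result, no segment list built (alternative).

-- ===== PORT A =====
-- the for-loop with early 'return False' over the segments
def IsFloatNumLoop : List (List Char) → Bool
  | [] => true
  | si :: rest => if !(PySem.Chars.strIsdigit si) then false else IsFloatNumLoop rest

-- str.split('.') with the nonempty literal separator is PySem.Chars.splitOn on the code points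
def IsFloatNum (str : String) : Bool :=
  let s := PySem.Chars.splitOn str.toList ['.']
  if s.length > 2 then false
  else IsFloatNumLoop s

-- ===== PORT B =====
-- the scan loop of Source B: state = (dots so far, expecting a digit)
def IsFloatNumScan : List Char → Nat → Bool → Bool
  | [], dots, expect => !expect && decide (dots ≤ 1)
  | c :: rest, dots, expect =>
    if c == '.' then
      if expect then false else IsFloatNumScan rest (dots + 1) true
    else if PySem.Chars.isdigit c then IsFloatNumScan rest dots false
    else false

def IsFloatNum_alt (str : String) : Bool := IsFloatNumScan str.toList 0 true

-- ===== PRECONDITION & SPEC =====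
def Spec_IsFloatNum (str : String) (out : Bool) : Prop := out = IsFloatNum_alt str
instance (str : String) (out : Bool) : Decidable (Spec_IsFloatNum str out) := by unfold Spec_IsFloatNum; infer_instance

-- ===== CLAIM (what is proved, stated in full; the proofs are below) =====
def Claim_equal_IsFloatNum : Prop := ∀ (str : String), Dom_IsFloatNum str → Spec_IsFloatNum str (IsFloatNum str)

-- ===== LEMMAS AND PROOFS =====

-- simple structural recursion computing splitOn on the single-char '.' separator
def pvMyGo : List Char → List Char → List (List Char)
  | [], cur => [cur.reverse]
  | c :: rest, cur => if c == '.' then cur.reverse :: pvMyGo rest [] else pvMyGo rest (c :: cur)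

theorem pvGo_eq (fuel : Nat) : ∀ (l cur : List Char) (acc : List (List Char)),
    l.length ≤ fuel →
    PySem.Chars.splitOn.go ['.'] fuel l cur acc = acc.reverse ++ pvMyGo l cur := by
  induction fuel with
  | zero =>
    intro l cur acc h
    have : l = [] := List.eq_nil_of_length_eq_zero (Nat.le_zero.mp h)
    subst this
    simp [PySem.Chars.splitOn.go, pvMyGo]
  | succ n ih =>
    intro l cur acc h
    cases l with
    | nil => simp [PySem.Chars.splitOn.go, pvMyGo]
    | cons c rest =>
      simp only [PySem.Chars.splitOn.go]
      by_cases hc : c = '.'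
      · subst hc
        have hp : List.isPrefixOf ['.'] ('.' :: rest) = true := by
          simp [List.isPrefixOf]
        rw [if_pos hp]
        simp only [List.length_cons, List.length_nil, List.drop_succ_cons, List.drop_zero]
        rw [ih rest [] (cur.reverse :: acc) (Nat.le_of_succ_le_succ h)]
        simp [pvMyGo]
      · have hp : List.isPrefixOf ['.'] (c :: rest) = false := by
          simp [List.isPrefixOf]
          exact fun hx => hc hx.symm
        rw [if_neg (by simp [hp])]
        rw [ih rest (c :: cur) acc (Nat.le_of_succ_le_succ h)]
        simp [pvMyGo, hc]

theorem pvSplitOn_eq (cs : List Char) :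
    PySem.Chars.splitOn cs ['.'] = pvMyGo cs [] := by
  unfold PySem.Chars.splitOn
  rw [pvGo_eq (cs.length + 1) cs [] [] (Nat.le_succ _)]
  simp

theorem pvLen_myGo : ∀ (cs cur : List Char),
    (pvMyGo cs cur).length = cs.count '.' + 1 := by
  intro cs
  induction cs with
  | nil => intro cur; simp [pvMyGo]
  | cons c rest ih =>
    intro cur
    by_cases hc : c = '.'
    · subst hc; simp [pvMyGo, ih]
    · simp [pvMyGo, hc, ih]

theorem pvLoop_eq_all : ∀ (l : List (List Char)),
    IsFloatNumLoop l = l.all PySem.Chars.strIsdigit := by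
  intro l
  induction l with
  | nil => rfl
  | cons si rest ih =>
    simp only [IsFloatNumLoop, List.all_cons, ih]
    cases h : PySem.Chars.strIsdigit si <;> simp

theorem pvMem_digit : ∀ (cs cur : List Char) (c : Char),
    c ∈ cur → (pvMyGo cs cur).all PySem.Chars.strIsdigit = true →
    PySem.Chars.isdigit c = true := by
  intro cs
  induction cs with
  | nil =>
    intro cur c hm hall
    simp [pvMyGo, PySem.Chars.strIsdigit, List.all_eq_true] at hall
    exact hall.2 c (by simpa using hm)
  | cons d rest ih =>
    intro cur c hm hall
    by_cases hd : d = '.'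
    · subst hd
      simp only [pvMyGo, beq_self_eq_true, if_true] at hall
      simp [PySem.Chars.strIsdigit, List.all_eq_true] at hall
      exact hall.1.2 c (by simpa using hm)
    · rw [show pvMyGo (d :: rest) cur = pvMyGo rest (d :: cur) by
        simp [pvMyGo, hd]] at hall
      exact ih (d :: cur) c (List.mem_cons_of_mem d hm) hall

-- a nonempty all-digit segment written back-to-front passes strIsdigit
theorem pvRevDigit (a : Char) (t : List Char)
    (hcur : (a :: t).all PySem.Chars.isdigit = true) :
    PySem.Chars.strIsdigit (t.reverse ++ [a]) = true := by
  simp [PySem.Chars.strIsdigit, List.all_eq_true] at *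
  constructor
  · intro x hx; exact hcur.2 x hx
  · exact hcur.1

theorem pvScan_eq : ∀ (cs cur : List Char) (dots : Nat),
    cur.all PySem.Chars.isdigit = true →
    IsFloatNumScan cs dots cur.isEmpty
      = (decide (dots + cs.count '.' ≤ 1) && (pvMyGo cs cur).all PySem.Chars.strIsdigit) := by
  intro cs
  induction cs with
  | nil =>
    intro cur dots hcur
    cases cur with
    | nil => simp [IsFloatNumScan, pvMyGo, PySem.Chars.strIsdigit]
    | cons a t =>
      simp [IsFloatNumScan, pvMyGo, pvRevDigit a t hcur, Bool.and_comm]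
  | cons c rest ih =>
    intro cs_cur dots hcur
    by_cases hc : c = '.'
    · subst hc
      cases cs_cur with
      | nil =>
        simp [IsFloatNumScan, pvMyGo, PySem.Chars.strIsdigit]
      | cons a t =>
        have h2 := ih [] (dots + 1) (by simp)
        simp only [List.isEmpty_nil] at h2
        have harith : (dots + 1 + List.count '.' rest ≤ 1)
            = (dots + List.count '.' ('.' :: rest) ≤ 1) := by
          simp; constructor <;> (intro; omega)
        simp [IsFloatNumScan, pvMyGo, h2, pvRevDigit a t hcur, harith]
    · by_cases hdig : PySem.Chars.isdigit c = true
      · have h2 := ih (c :: cs_cur) dots (by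
          simp [List.all_eq_true, hdig] at *
          exact fun x hx => hcur x hx)
        simp only [List.isEmpty_cons] at h2
        simp [IsFloatNumScan, hc, hdig, h2, pvMyGo]
      · have hall : (pvMyGo (c :: rest) cs_cur).all PySem.Chars.strIsdigit = false := by
          rw [show pvMyGo (c :: rest) cs_cur = pvMyGo rest (c :: cs_cur) by
            simp [pvMyGo, hc]]
          cases hx : (pvMyGo rest (c :: cs_cur)).all PySem.Chars.strIsdigit
          · rfl
          · exact absurd (pvMem_digit rest (c :: cs_cur) c List.mem_cons_self hx) hdig
        simp [IsFloatNumScan, hc, hdig, hall]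

-- ===== VERDICT (by name: the statement is the Claim_ definition above) =====
theorem IsFloatNum_spec : Claim_equal_IsFloatNum := by
  intro str _
  unfold Spec_IsFloatNum
  simp only [IsFloatNum, IsFloatNum_alt, pvSplitOn_eq]
  rw [pvLoop_eq_all, pvLen_myGo]
  have h2 := pvScan_eq str.toList [] 0 (by simp)
  simp only [List.isEmpty_nil] at h2
  rw [h2]
  by_cases h : str.toList.count '.' + 1 > 2
  · rw [if_pos h]
    have hd : (decide (0 + List.count '.' str.toList ≤ 1)) = false := by
      simp only [decide_eq_false_iff_not]; omega
    rw [hd, Bool.false_and]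
  · rw [if_neg h]
    have hd : (decide (0 + List.count '.' str.toList ≤ 1)) = true := by
      simp only [decide_eq_true_eq]; omega
    rw [hd, Bool.true_and]
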